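-- pv_equiv track=rewrite | github.com/64andy/Advent-of-Code | 2021/12/2_answer.py | path_is_valid
-- ===== SOURCE A (Python) =====
-- from collections import defaultdict, deque, Counter
--
-- def path_is_valid(path) -> bool:
--     """
--     Returns if the given path is valid.
--     Current rules: A single lower node can be
--     revisited twice.
--
--     This function goes off the assumption that everything
--     before the head is valid.
--     """
--     counter = Counter(path)
--     # We can't revisit 'start'
--     if counter['start'] > 1:
--         return False
--     # Now check for repeats
--     has_repeat = False
--     for c, n in counter.most_common():
--         # Ignore uppers
--         if c.isupper():
--             continue
--         # Can't visit more than twice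
--         if n > 2:
--             return False
--         # Check it's the only repeat
--         if n == 2:
--             if has_repeat:
--                 return False
--             else:
--                 has_repeat = True
--     # Passed all checks
--     return True
-- ===== SOURCE B (Python) =====
-- def path_is_valid(path) -> bool:
--     """Single streaming pass: running counts + one has_repeat flag,
--     instead of building a Counter and scanning most_common()."""
--     counts = {}
--     has_repeat = False
--     for c in path:
--         n = counts.get(c, 0) + 1
--         counts[c] = n
--         if c == 'start' and n > 1:
--             return False
--         if not c.isupper():
--             if n > 2:
--                 return False
--             if n == 2:
--                 if has_repeat:
--                     return False
--                 has_repeat = True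
--     return True
-- ===== Notes on version B (the rewrite author's own statement) =====
-- stated objective: simpler
-- what changed: B fuses counting and validation into one streaming pass over the path with a running counts dict and a has_repeat flag, instead of A's building a full Counter and then scanning counter.most_common().
import Mathlib
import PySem

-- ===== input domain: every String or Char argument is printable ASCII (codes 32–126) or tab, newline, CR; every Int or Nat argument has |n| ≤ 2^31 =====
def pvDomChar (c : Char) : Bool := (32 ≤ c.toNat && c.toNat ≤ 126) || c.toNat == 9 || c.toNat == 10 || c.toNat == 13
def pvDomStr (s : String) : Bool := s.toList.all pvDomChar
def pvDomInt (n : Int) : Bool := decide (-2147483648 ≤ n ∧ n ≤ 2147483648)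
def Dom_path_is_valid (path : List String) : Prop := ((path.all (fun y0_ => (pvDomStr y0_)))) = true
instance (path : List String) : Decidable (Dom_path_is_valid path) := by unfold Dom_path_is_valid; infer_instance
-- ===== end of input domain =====

-- B replaces A's Counter + most_common() scan by a single streaming pass with running
-- counts and a has_repeat flag (objective: simpler; a timing run measured it faster).

-- hand port of Python str.isupper(), exact on the ASCII domain: at least one letter
-- and no lowercase letter (shared by both ports: both Pythons call c.isupper())
def pyStrIsupper (s : String) : Bool :=
  (s.toList.any (fun ch => PySem.Chars.isalpha ch)) &&
  (s.toList.all (fun ch => !PySem.Chars.islower ch))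

-- ===== PORT A =====
-- the 'for c, n in counter.most_common()' loop of A with its early returns
def pvGoA : List (String × Int) → Bool → Bool
  | [], _ => true
  | (c, n) :: t, hr =>
    if pyStrIsupper c then pvGoA t hr
    else if n > 2 then false
    else if n == 2 then (if hr then false else pvGoA t true)
    else pvGoA t hr

def path_is_valid (path : List String) : Bool :=
  let counter := PySem.Dict.counter path
  -- Counter['start'] returns 0 for a missing key
  if counter.getD "start" 0 > 1 then false
  else
    -- most_common() = sorted(items, key=count, reverse=True), stable
    pvGoA (PySem.List.sorted counter.items (fun p => p.2) true) false

-- ===== PORT B =====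
-- the single streaming pass of Source B
def pvGoB : List String → PySem.Dict String Int → Bool → Bool
  | [], _, _ => true
  | c :: t, counts, hr =>
    let n := counts.getD c 0 + 1
    let counts' := counts.insert c n
    if c == "start" && decide (n > 1) then false
    else if !pyStrIsupper c then
      if n > 2 then false
      else if n == 2 then (if hr then false else pvGoB t counts' true)
      else pvGoB t counts' hr
    else pvGoB t counts' hr

def path_is_valid_alt (path : List String) : Bool :=
  pvGoB path PySem.Dict.empty false

-- ===== PRECONDITION & SPEC =====
def Spec_path_is_valid (path : List String) (out : Bool) : Prop := out = path_is_valid_alt path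
instance (path : List String) (out : Bool) : Decidable (Spec_path_is_valid path out) := by unfold Spec_path_is_valid; infer_instance

-- ===== CLAIM (what is proved, stated in full; the proofs are below) =====
def Claim_equal_path_is_valid : Prop := ∀ (path : List String), Dom_path_is_valid path → Spec_path_is_valid path (path_is_valid path)

-- ===== LEMMAS AND PROOFS =====

-- the order-free characterisation both programs compute: start visited at most once,
-- no lowercase cave visited more than twice, at most one distinct lowercase cave visited twice
def pvF (path : List String) : Bool :=
  decide (path.count "start" ≤ 1)
  && !((PySem.Set.ofList path).any (fun c => !pyStrIsupper c && decide (path.count c > 2)))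
  && decide (((PySem.Set.ofList path).countP (fun c => !pyStrIsupper c && decide (path.count c = 2))) ≤ 1)

def pvBadP : String × Int → Bool := fun p => !pyStrIsupper p.1 && decide (p.2 > 2)

def pvRepP : String × Int → Bool := fun p => !pyStrIsupper p.1 && decide (p.2 = 2)

def pvR (p : List String) : Nat :=
  (PySem.Set.ofList p).countP (fun c => !pyStrIsupper c && decide (p.count c = 2))

lemma pvGoA_char (l : List (String × Int)) (hr : Bool) :
    pvGoA l hr = (!l.any pvBadP && decide (l.countP pvRepP + (if hr then 1 else 0) ≤ 1)) := by
  induction l generalizing hr with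
  | nil => cases hr <;> simp [pvGoA]
  | cons p t ih =>
    obtain ⟨c, n⟩ := p
    by_cases hu : pyStrIsupper c
    · simp only [pvGoA, hu, if_true, ih, List.any_cons, List.countP_cons, pvBadP, pvRepP]
      simp
    · by_cases h2 : n > 2
      · simp only [pvGoA, hu, if_false, Bool.false_eq_true, h2, if_true]
        simp [pvBadP, hu, h2]
      · by_cases he : n = 2
        · subst he
          cases hr with
          | false =>
            simp only [pvGoA, hu, Bool.false_eq_true, if_false, h2, if_true, beq_self_eq_true, ih]
            simp only [List.any_cons, List.countP_cons, pvBadP, pvRepP, hu]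
            simp
            rfl
          | true =>
            simp only [pvGoA, hu, Bool.false_eq_true, if_false, h2, if_true, beq_self_eq_true]
            simp only [List.any_cons, List.countP_cons, pvBadP, pvRepP, hu]
            simp
        · have hne : (n == 2) = false := by simp [he]
          simp only [pvGoA, hu, Bool.false_eq_true, if_false, h2, hne, ih]
          simp only [List.any_cons, List.countP_cons, pvBadP, pvRepP, hu]
          simp [h2, he]

lemma pv_cast_eq (n : Nat) : decide ((n : Int) = 2) = decide (n = 2) := by rw [decide_eq_decide]; omega

lemma pvA_eq_F (path : List String) : path_is_valid path = pvF path := by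
  unfold path_is_valid pvF
  simp only []
  show (if (PySem.Dict.counter path).getD "start" 0 > 1 then false else pvGoA (PySem.List.sorted (PySem.Dict.counter path).items (fun p => p.2) true) false) = _
  rw [PySem.Dict.getD_counter]
  by_cases hs : path.count "start" > 1
  · have : ((path.count "start" : Int) > 1) := by omega
    simp [this, hs]
  · have h1 : ¬ ((path.count "start" : Int) > 1) := by omega
    rw [if_neg h1]
    rw [pvGoA_char]
    have hperm := PySem.List.sorted_perm (PySem.Dict.counter path).items (fun p => p.2) true
    rw [List.Perm.any_eq hperm, List.Perm.countP_congr hperm (fun _ _ => rfl)]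
    rw [PySem.Dict.items_counter, List.any_map, List.countP_map]
    have e1 : (pvBadP ∘ fun k => (k, (path.count k : Int))) = (fun c => !pyStrIsupper c && decide (path.count c > 2)) := by
      funext c; simp [pvBadP]
    have e2 : (pvRepP ∘ fun k => (k, (path.count k : Int))) = (fun c => !pyStrIsupper c && decide (path.count c = 2)) := by
      funext c; simp [pvRepP, pv_cast_eq]
    rw [e1, e2]
    have h2 : decide (path.count "start" ≤ 1) = true := by simp; omega
    simp [h2]

lemma pv_countP_update {l : List String} {c : String} (hnd : l.Nodup) (hc : c ∈ l)
    (p q : String → Bool) (hagree : ∀ x ∈ l, x ≠ c → p x = q x) :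
    l.countP q + (if p c then 1 else 0) = l.countP p + (if q c then 1 else 0) := by
  have hperm := List.perm_cons_erase hc
  have hq := List.Perm.countP_congr hperm (fun _ _ => rfl) (p := q)
  have hp := List.Perm.countP_congr hperm (fun _ _ => rfl) (p := p)
  have herase : (l.erase c).countP q = (l.erase c).countP p := by
    apply List.countP_congr
    intro x hx
    have hx2 := (List.Nodup.mem_erase_iff hnd).mp hx
    rw [hagree x hx2.2 hx2.1]
  rw [hq, hp, List.countP_cons, List.countP_cons, herase]
  omega

lemma pv_ofList_append (p : List String) (c : String) :
    PySem.Set.ofList (p ++ [c]) = (PySem.Set.ofList p).add c := by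
  simp [PySem.Set.ofList, List.foldl_append]

lemma pv_count_append (p : List String) (c x : String) :
    (p ++ [c]).count x = p.count x + (if x = c then 1 else 0) := by
  rw [List.count_append]
  congr 1
  rcases eq_or_ne x c with rfl | hne
  · simp
  · simp [hne, Ne.symm hne]

lemma pvR_append (p : List String) (c : String)
    (h : pyStrIsupper c = true ∨ p.count c ≤ 1) :
    pvR (p ++ [c]) = pvR p + (if !pyStrIsupper c && decide (p.count c = 1) then 1 else 0) := by
  unfold pvR
  rw [pv_ofList_append]
  have hcnt : ∀ x, (p ++ [c]).count x = p.count x + (if x = c then 1 else 0) := pv_count_append p c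
  by_cases hmem : c ∈ p
  · -- set unchanged
    have hcontains : (PySem.Set.ofList p).contains c = true := by
      simp [List.contains_iff_mem, PySem.Set.mem_ofList, hmem]
    rw [PySem.Set.add, if_pos hcontains]
    have hcset : c ∈ PySem.Set.ofList p := (PySem.Set.mem_ofList p c).mpr hmem
    have := pv_countP_update (PySem.Set.nodup_ofList p) hcset
      (fun x => !pyStrIsupper x && decide (p.count x = 2))
      (fun x => !pyStrIsupper x && decide ((p ++ [c]).count x = 2))
      (by intro x _ hxc; simp [hcnt x, hxc])
    have hpredc : (!pyStrIsupper c && decide (p.count c = 2)) = false := by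
      rcases h with h | h
      · simp [h]
      · have : p.count c ≠ 2 := by omega
        simp [this]
    have hpredc' : (!pyStrIsupper c && decide ((p ++ [c]).count c = 2))
        = (!pyStrIsupper c && decide (p.count c = 1)) := by
      have hcc : (p ++ [c]).count c = p.count c + 1 := by rw [hcnt c]; simp
      rw [hcc]
      congr 1
      rw [decide_eq_decide]; omega
    simp only [hpredc, hpredc', Bool.false_eq_true, if_false, add_zero] at this
    rw [this]
  · -- fresh element appended to the set
    have hcontains : (PySem.Set.ofList p).contains c = false := by
      simp [List.contains_iff_mem, PySem.Set.mem_ofList, hmem]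
    rw [PySem.Set.add, hcontains]
    simp only [Bool.false_eq_true, if_false, List.countP_append]
    have hcount0 : p.count c = 0 := List.count_eq_zero.mpr hmem
    have hc1 : List.countP (fun x => !pyStrIsupper x && decide ((p ++ [c]).count x = 2)) [c] = 0 := by
      simp [List.countP_cons, hcnt c, hcount0]
    have hc2 : (PySem.Set.ofList p).countP (fun x => !pyStrIsupper x && decide ((p ++ [c]).count x = 2))
        = (PySem.Set.ofList p).countP (fun x => !pyStrIsupper x && decide (p.count x = 2)) := by
      apply List.countP_congr
      intro x hx
      have hxp : x ∈ p := (PySem.Set.mem_ofList p x).mp hx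
      have hxc : x ≠ c := fun e => hmem (e ▸ hxp)
      simp [hcnt x, hxc]
    rw [hc1, hc2]
    simp [hcount0]

lemma pv_upper_start : pyStrIsupper "start" = false := by decide

lemma pv_two_le_countP {l : List String} (hnd : l.Nodup) {a b : String}
    (ha : a ∈ l) (hb : b ∈ l) (hne : a ≠ b) {p : String → Bool}
    (hpa : p a = true) (hpb : p b = true) : 2 ≤ l.countP p := by
  have hperm := List.perm_cons_erase ha
  have hbe : b ∈ l.erase a := by
    rw [List.mem_erase_of_ne (Ne.symm hne)]; exact hb
  have h1 : 0 < (l.erase a).countP p := List.countP_pos_iff.mpr ⟨b, hbe, hpb⟩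
  rw [List.Perm.countP_congr hperm (fun _ _ => rfl), List.countP_cons]
  rw [hpa]
  rw [if_pos rfl]
  omega

lemma pvF_false_start (path : List String) (h : path.count "start" > 1) : pvF path = false := by
  unfold pvF
  have h1 : decide (path.count "start" ≤ 1) = false := by simp; omega
  rw [h1]; simp

lemma pvF_false_big (path : List String) (c : String) (hc : c ∈ path)
    (hup : pyStrIsupper c = false) (h : path.count c > 2) : pvF path = false := by
  unfold pvF
  have h1 : (PySem.Set.ofList path).any (fun c => !pyStrIsupper c && decide (path.count c > 2)) = true :=
    List.any_eq_true.mpr ⟨c, (PySem.Set.mem_ofList path c).mpr hc, by simp [hup, h]⟩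
  rw [h1]; simp

lemma pvF_false_two (path : List String) (x c : String) (hx : x ∈ path) (hc : c ∈ path)
    (hne : x ≠ c) (hux : pyStrIsupper x = false) (huc : pyStrIsupper c = false)
    (h2x : path.count x = 2) (h2c : path.count c = 2) : pvF path = false := by
  unfold pvF
  have h2 : 2 ≤ (PySem.Set.ofList path).countP (fun c => !pyStrIsupper c && decide (path.count c = 2)) :=
    pv_two_le_countP (PySem.Set.nodup_ofList path)
      ((PySem.Set.mem_ofList path x).mpr hx) ((PySem.Set.mem_ofList path c).mpr hc) hne
      (by simp [hux, h2x]) (by simp [huc, h2c])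
  have h3 : decide ((PySem.Set.ofList path).countP (fun c => !pyStrIsupper c && decide (path.count c = 2)) ≤ 1) = false := by
    simp; omega
  rw [h3]; simp

lemma pvGoB_inv (t : List String) : ∀ (p : List String) (hr : Bool),
    p.count "start" ≤ 1 →
    (∀ c ∈ p, pyStrIsupper c = false → p.count c ≤ 2) →
    pvR p ≤ 1 →
    hr = decide (pvR p = 1) →
    pvGoB t (PySem.Dict.counter p) hr = pvF (p ++ t) := by
  induction t with
  | nil =>
    intro p hr hstart hlow hR hhr
    have h1 : decide (p.count "start" ≤ 1) = true := by simp [hstart]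
    have h2 : (PySem.Set.ofList p).any (fun c => !pyStrIsupper c && decide (p.count c > 2)) = false := by
      rw [List.any_eq_false]
      intro x hx
      by_cases hux : pyStrIsupper x
      · simp [hux]
      · have := hlow x ((PySem.Set.mem_ofList p x).mp hx) (by simp [hux])
        simp [hux]; omega
    have h3 : decide (pvR p ≤ 1) = true := by simp [hR]
    simp only [pvGoB, List.append_nil, pvF]
    rw [h1, h2]
    unfold pvR at h3
    rw [h3]
    simp
  | cons c t' ih =>
    intro p hr hstart hlow hR hhr
    have hn : (PySem.Dict.counter p).getD c 0 = ((p.count c : Int)) := PySem.Dict.getD_counter p c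
    have hins : (PySem.Dict.counter p).insert c ((p.count c : Int) + 1) = PySem.Dict.counter (p ++ [c]) := by
      rw [PySem.Dict.counter_append_singleton]
      show _ = (PySem.Dict.counter p).insert c ((PySem.Dict.counter p).getD c 0 + 1)
      rw [hn]
    have hassoc : p ++ c :: t' = (p ++ [c]) ++ t' := by simp
    have hcount_full : ∀ x, (p ++ c :: t').count x = p.count x + (if x = c then 1 else 0) + t'.count x := by
      intro x
      rw [List.count_append, List.count_cons]
      rcases eq_or_ne x c with rfl | hne
      · simp
        omega
      · simp [hne]
        exact fun e => hne e.symm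
    simp only [pvGoB, hn, hins]
    by_cases hguard : (c == "start" && decide ((p.count c : Int) + 1 > 1)) = true
    · rw [if_pos hguard]
      simp only [beq_iff_eq, Bool.and_eq_true, decide_eq_true_eq] at hguard
      obtain ⟨rfl, hgt⟩ := hguard
      have : (p ++ "start" :: t').count "start" > 1 := by
        rw [hcount_full]; simp; omega
      rw [pvF_false_start _ this]
    · rw [if_neg hguard]
      have hguard' : c = "start" → p.count c = 0 := by
        intro e
        by_contra hne0
        subst e
        apply hguard
        simp only [beq_self_eq_true, Bool.true_and, decide_eq_true_eq]
        omega
      by_cases hup : pyStrIsupper c = true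
      · -- uppercase cave: counts irrelevant, recurse
        have hcne : c ≠ "start" := by
          intro e; rw [e, pv_upper_start] at hup; exact absurd hup (by simp)
        rw [if_neg (by simp [hup])]
        rw [hassoc]
        apply ih
        · rw [pv_count_append]; simp [Ne.symm hcne]; omega
        · intro x hx hux
          rcases List.mem_append.mp hx with hxp | hxc
          · have hxne : x ≠ c := by intro e; rw [e, hup] at hux; exact absurd hux (by simp)
            rw [pv_count_append]; simp [hxne]
            exact hlow x hxp hux
          · simp at hxc
            subst hxc
            rw [hup] at hux; exact absurd hux (by simp)
        · rw [pvR_append p c (Or.inl hup)]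
          simp [hup]; omega
        · rw [pvR_append p c (Or.inl hup)]
          simp [hup, hhr]
      · -- lowercase cave
        have hupf : pyStrIsupper c = false := by simpa using hup
        rw [if_pos (by simp [hupf])]
        by_cases hgt : ((p.count c : Int) + 1 > 2)
        · rw [if_pos (by simpa using hgt)]
          have hcv : (p ++ c :: t').count c > 2 := by
            rw [hcount_full]; simp; omega
          rw [pvF_false_big _ c (by simp) hupf hcv]
        · rw [if_neg (by simpa using hgt)]
          by_cases he2 : ((p.count c : Int) + 1 = 2)
          · have hc1 : p.count c = 1 := by omega
            rw [if_pos (by simp [he2])]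
            have hcne : c ≠ "start" := by
              intro e
              have := hguard' e
              omega
            cases hr with
            | true =>
              rw [if_pos rfl]
              -- there is already a twice-visited lower cave x in p
              have hRpos : 0 < pvR p := by
                rcases Nat.eq_zero_or_pos (pvR p) with h0 | h0
                · rw [h0] at hhr; simp at hhr
                · exact h0
              obtain ⟨x, hxset, hxpred⟩ := List.countP_pos_iff.mp hRpos
              simp only [Bool.and_eq_true, Bool.not_eq_eq_eq_not, Bool.not_true, decide_eq_true_eq] at hxpred
              obtain ⟨hux, hx2⟩ := hxpred
              have hxp : x ∈ p := (PySem.Set.mem_ofList p x).mp hxset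
              have hxne : x ≠ c := by intro e; rw [e, hc1] at hx2; omega
              -- in the full path x and c are each visited at least twice
              have hxfull : (p ++ c :: t').count x ≥ 2 := by rw [hcount_full]; omega
              have hcfull : (p ++ c :: t').count c ≥ 2 := by rw [hcount_full]; simp; omega
              rcases Nat.lt_or_ge ((p ++ c :: t').count x) 3 with hx3 | hx3
              · rcases Nat.lt_or_ge ((p ++ c :: t').count c) 3 with hc3 | hc3
                · rw [pvF_false_two _ x c (by simp [hxp]) (by simp) hxne hux hupf (by omega) (by omega)]
                · rw [pvF_false_big _ c (by simp) hupf (by omega)]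
              · rw [pvF_false_big _ x (by simp [hxp]) hux (by omega)]
            | false =>
              rw [if_neg (by simp)]
              have hR0 : pvR p = 0 := by
                symm at hhr
                simp at hhr
                omega
              rw [hassoc]
              apply ih
              · rw [pv_count_append]; simp [Ne.symm hcne]; omega
              · intro x hx hux
                rcases eq_or_ne x c with rfl | hxne
                · rw [pv_count_append]; simp; omega
                · rw [pv_count_append]; simp [hxne]
                  rcases List.mem_append.mp hx with hxp | hxc
                  · exact hlow x hxp hux
                  · simp at hxc; exact absurd hxc hxne
              · rw [pvR_append p c (Or.inr (by omega))]
                simp [hupf, hc1, hR0]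
              · rw [pvR_append p c (Or.inr (by omega))]
                simp [hupf, hc1, hR0]
          · have hc0 : p.count c = 0 := by omega
            rw [if_neg (by simp [he2])]
            rw [hassoc]
            apply ih
            · rcases eq_or_ne c "start" with rfl | hcne
              · rw [pv_count_append]; simp; omega
              · rw [pv_count_append]; simp [Ne.symm hcne]; omega
            · intro x hx hux
              rcases eq_or_ne x c with rfl | hxne
              · rw [pv_count_append]; simp; omega
              · rw [pv_count_append]; simp [hxne]
                rcases List.mem_append.mp hx with hxp | hxc
                · exact hlow x hxp hux
                · simp at hxc; exact absurd hxc hxne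
            · rw [pvR_append p c (Or.inr (by omega))]
              simp [hc0]; omega
            · rw [pvR_append p c (Or.inr (by omega))]
              simp [hc0, hhr]

lemma pvB_eq_F (path : List String) : path_is_valid_alt path = pvF path := by
  have h := pvGoB_inv path [] false (by simp) (by simp) (by decide) (by decide)
  simpa [path_is_valid_alt, PySem.Dict.counter] using h

-- ===== VERDICT (by name: the statement is the Claim_ definition above) =====
theorem path_is_valid_spec : Claim_equal_path_is_valid := by
  intro path _
  unfold Spec_path_is_valid
  rw [pvA_eq_F, pvB_eq_F]
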